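-- pv_equiv track=rewrite | github.com/Sgraus/ExcelScript | confronta_indirizzi.py | _overall_flag
-- ===== SOURCE A (Python) =====
-- from typing import Callable, Iterable, List, Sequence
--
-- def _overall_flag(flags: Sequence[str]) -> str:
--     if all(flag in {"uguale", "vuoti"} for flag in flags):
--         return "coincidenza"
--     if any(flag == "diverso" for flag in flags):
--         return "differenza"
--     if any(flag == "simile" for flag in flags):
--         return "simile"
--     if any(flag.startswith("solo_file") for flag in flags):
--         return "incompleto"
--     return "parziale"
-- ===== SOURCE B (Python) =====
-- def _overall_flag(flags):
--     all_uguale_vuoti = True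
--     has_diverso = False
--     has_simile = False
--     has_solo_file = False
--     for flag in flags:
--         all_uguale_vuoti = all_uguale_vuoti and flag in ("uguale", "vuoti")
--         has_diverso = has_diverso or flag == "diverso"
--         has_simile = has_simile or flag == "simile"
--         has_solo_file = has_solo_file or flag.startswith("solo_file")
--     if all_uguale_vuoti:
--         return "coincidenza"
--     if has_diverso:
--         return "differenza"
--     if has_simile:
--         return "simile"
--     if has_solo_file:
--         return "incompleto"
--     return "parziale"
-- ===== Notes on version B (the rewrite author's own statement) =====
-- stated objective: alternative
-- what changed: Replaces A's four separate generator scans (all/any/any/any) with one fused pass maintaining four boolean accumulators, deciding the category from them after the loop.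
import Mathlib
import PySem

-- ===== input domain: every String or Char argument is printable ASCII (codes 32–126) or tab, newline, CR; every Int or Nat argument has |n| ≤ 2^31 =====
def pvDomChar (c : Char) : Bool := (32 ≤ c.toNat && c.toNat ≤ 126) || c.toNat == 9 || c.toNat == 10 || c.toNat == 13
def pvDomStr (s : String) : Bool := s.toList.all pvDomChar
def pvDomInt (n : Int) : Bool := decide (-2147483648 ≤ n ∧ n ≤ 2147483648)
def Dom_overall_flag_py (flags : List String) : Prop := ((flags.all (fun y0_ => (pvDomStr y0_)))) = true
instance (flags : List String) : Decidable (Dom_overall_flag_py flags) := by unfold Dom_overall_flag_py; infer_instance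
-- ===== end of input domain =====

-- B fuses A's four separate all/any scans into one single pass with four boolean accumulators (alternative decomposition, same cost).
-- ===== PORT A =====
def overall_flag_py (flags : List String) : String :=
  if flags.all (fun flag => flag == "uguale" || flag == "vuoti") then "coincidenza"
  else if flags.any (fun flag => flag == "diverso") then "differenza"
  else if flags.any (fun flag => flag == "simile") then "simile"
  else if flags.any (fun flag => PySem.Str.startswith flag "solo_file") then "incompleto"
  else "parziale"

-- ===== PORT B =====
def overallStep (st : Bool × Bool × Bool × Bool) (flag : String) : Bool × Bool × Bool × Bool :=
  (st.1 && (flag == "uguale" || flag == "vuoti"),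
   st.2.1 || flag == "diverso",
   st.2.2.1 || flag == "simile",
   st.2.2.2 || PySem.Str.startswith flag "solo_file")

def overall_flag_py_alt (flags : List String) : String :=
  let st := flags.foldl overallStep (true, false, false, false)
  if st.1 then "coincidenza"
  else if st.2.1 then "differenza"
  else if st.2.2.1 then "simile"
  else if st.2.2.2 then "incompleto"
  else "parziale"

-- ===== PRECONDITION & SPEC =====
def Spec_overall_flag_py (flags : List String) (out : String) : Prop := out = overall_flag_py_alt flags
instance (flags : List String) (out : String) : Decidable (Spec_overall_flag_py flags out) := by unfold Spec_overall_flag_py; infer_instance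

-- ===== CLAIM (what is proved, stated in full; the proofs are below) =====
def Claim_equal_overall_flag_py : Prop := ∀ (flags : List String), Dom_overall_flag_py flags → Spec_overall_flag_py flags (overall_flag_py flags)

-- ===== LEMMAS AND PROOFS =====
theorem overallStep_foldl (flags : List String) (a d s f : Bool) :
    flags.foldl overallStep (a, d, s, f) =
      (a && flags.all (fun flag => flag == "uguale" || flag == "vuoti"),
       d || flags.any (fun flag => flag == "diverso"),
       s || flags.any (fun flag => flag == "simile"),
       f || flags.any (fun flag => PySem.Str.startswith flag "solo_file")) := by
  induction flags generalizing a d s f with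
  | nil => simp
  | cons x xs ih =>
      simp [overallStep, ih, Bool.and_assoc, Bool.or_assoc]

-- ===== VERDICT (by name: the statement is the Claim_ definition above) =====
theorem overall_flag_py_spec : Claim_equal_overall_flag_py := by
  intro flags _
  unfold Spec_overall_flag_py overall_flag_py overall_flag_py_alt
  simp [overallStep_foldl]
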